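-- pv_equiv track=rewrite | github.com/NNDam/Faster-RCNN-from-scratch | utils.py | get_trademark
-- ===== SOURCE A (Python) =====
-- def get_trademark(clss):
-- 	vietin = 0
-- 	vietcom = 0
-- 	bidv = 0
-- 	for i in clss:
-- 		if i == 1 or i == 2:
-- 			vietin = 1
-- 		if i == 3 or i == 4:
-- 			vietcom = 1
-- 		if i == 9 or i == 10:
-- 			bidv = 1
-- 	return [vietin, vietcom, bidv]
-- ===== SOURCE B (Python) =====
-- def get_trademark(clss):
-- 	def hit(targets):
-- 		return int(any(i in targets for i in clss))
-- 	return [hit((1, 2)), hit((3, 4)), hit((9, 10))]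
-- ===== Notes on version B (the rewrite author's own statement) =====
-- stated objective: idiomatic
-- what changed: Replaces the single scan mutating three flag variables with three independent short-circuiting any() passes, one per trademark, assembled directly into the result list.
import Mathlib
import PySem

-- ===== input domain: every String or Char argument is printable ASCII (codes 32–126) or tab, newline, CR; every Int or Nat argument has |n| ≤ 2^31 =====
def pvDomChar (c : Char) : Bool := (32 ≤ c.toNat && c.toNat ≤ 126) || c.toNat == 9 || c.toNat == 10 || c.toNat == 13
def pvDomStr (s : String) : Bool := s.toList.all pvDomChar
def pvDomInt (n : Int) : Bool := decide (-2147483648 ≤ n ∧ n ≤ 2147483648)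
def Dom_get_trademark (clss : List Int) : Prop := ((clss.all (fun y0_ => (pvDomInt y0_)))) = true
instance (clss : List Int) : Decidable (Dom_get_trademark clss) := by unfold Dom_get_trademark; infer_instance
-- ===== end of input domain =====

-- B replaces A's single flag-mutating scan with three independent short-circuiting any() passes (idiomatic, same cost).

-- ===== PORT A =====
def get_trademark (clss : List Int) : List Int :=
  let st := clss.foldl (fun (st : Int × Int × Int) i =>
    let vietin := if i == 1 || i == 2 then 1 else st.1
    let vietcom := if i == 3 || i == 4 then 1 else st.2.1
    let bidv := if i == 9 || i == 10 then 1 else st.2.2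
    (vietin, vietcom, bidv)) (0, 0, 0)
  [st.1, st.2.1, st.2.2]

-- ===== PORT B =====
-- int(any(i in targets for i in clss)) for a two-element tuple of targets
def pvHit (clss : List Int) (a b : Int) : Int :=
  if clss.any (fun i => i == a || i == b) then 1 else 0

def get_trademark_alt (clss : List Int) : List Int :=
  [pvHit clss 1 2, pvHit clss 3 4, pvHit clss 9 10]

-- ===== PRECONDITION & SPEC =====
def Spec_get_trademark (clss : List Int) (out : List Int) : Prop := out = get_trademark_alt clss
instance (clss : List Int) (out : List Int) : Decidable (Spec_get_trademark clss out) := by unfold Spec_get_trademark; infer_instance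

-- ===== CLAIM (what is proved, stated in full; the proofs are below) =====
def Claim_equal_get_trademark : Prop := ∀ (clss : List Int), Dom_get_trademark clss → Spec_get_trademark clss (get_trademark clss)

-- ===== LEMMAS AND PROOFS =====

theorem foldl_flags (clss : List Int) (st : Int × Int × Int) :
    clss.foldl (fun (st : Int × Int × Int) i =>
      ((if i == 1 || i == 2 then 1 else st.1 : Int),
       (if i == 3 || i == 4 then 1 else st.2.1 : Int),
       (if i == 9 || i == 10 then 1 else st.2.2 : Int))) st
    = ((if (1 : Int) ∈ clss ∨ (2 : Int) ∈ clss then 1 else st.1),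
       (if (3 : Int) ∈ clss ∨ (4 : Int) ∈ clss then 1 else st.2.1),
       (if (9 : Int) ∈ clss ∨ (10 : Int) ∈ clss then 1 else st.2.2)) := by
  induction clss generalizing st with
  | nil => simp
  | cons h t ih =>
    simp only [List.foldl_cons, ih, List.mem_cons]
    obtain ⟨a, b, c⟩ := st
    simp only [beq_iff_eq, Bool.or_eq_true]
    congr 1
    · split_ifs with h1 h2 h3 <;> simp_all <;> tauto
    congr 1
    · split_ifs with h1 h2 h3 <;> simp_all <;> tauto
    · split_ifs with h1 h2 h3 <;> simp_all <;> tauto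

theorem pvHit_eq (clss : List Int) (a b : Int) :
    pvHit clss a b = (if a ∈ clss ∨ b ∈ clss then 1 else 0) := by
  unfold pvHit
  by_cases h : a ∈ clss ∨ b ∈ clss
  · have : clss.any (fun i => i == a || i == b) = true := by
      rw [List.any_eq_true]
      rcases h with h | h
      · exact ⟨a, h, by simp⟩
      · exact ⟨b, h, by simp⟩
    simp [this, h]
  · have : clss.any (fun i => i == a || i == b) = false := by
      rw [List.any_eq_false]
      intro x hx
      simp only [Bool.or_eq_true, beq_iff_eq, not_or]
      constructor <;> rintro rfl <;> exact h (by tauto)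
    simp [this, h]

-- ===== VERDICT (by name: the statement is the Claim_ definition above) =====
theorem get_trademark_spec : Claim_equal_get_trademark := by
  intro clss _
  unfold Spec_get_trademark get_trademark get_trademark_alt
  simp only [foldl_flags, pvHit_eq]
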